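-- pv_equiv track=rewrite | github.com/rickardlofberg/HMM-PoS-Tagger | evaluator.py | prepareForValidate
-- ===== SOURCE A (Python) =====
-- def prepareForValidate(corpusToTest):
--     # List of tupples
--     tuppleListOfSeq = list()
--     sequence = ""
--     correctTagSeq = ""
--
--     for tag, output in corpusToTest:
--         correctTagSeq += tag + " "
--         if output != "''":
--             sequence += output + " "
--         if tag == 'slut':
--             tuppleListOfSeq.append((sequence.rstrip(), correctTagSeq.rstrip()))
--             correctTagSeq = ""
--             sequence = ""
--     return tuppleListOfSeq
-- ===== SOURCE B (Python) =====
-- def prepareForValidate(corpusToTest):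
--     # Two passes: partition into 'slut'-terminated segments, then format each.
--     segments = []
--     current = []
--     for tag, output in corpusToTest:
--         current.append((tag, output))
--         if tag == 'slut':
--             segments.append(current)
--             current = []
--     # an unterminated trailing segment is discarded (as the task requires)
--     return [(' '.join(o for t, o in seg if o != "''").rstrip(),
--              ' '.join(t for t, o in seg).rstrip())
--             for seg in segments]
-- ===== Notes on version B (the rewrite author's own statement) =====
-- stated objective: simpler
-- what changed: B splits the work into two passes -- partition the corpus into 'slut'-terminated segments, then format each segment with ' '.join(...).rstrip() -- instead of A's single loop that grows two accumulator strings by repeated concatenation.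
import Mathlib
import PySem

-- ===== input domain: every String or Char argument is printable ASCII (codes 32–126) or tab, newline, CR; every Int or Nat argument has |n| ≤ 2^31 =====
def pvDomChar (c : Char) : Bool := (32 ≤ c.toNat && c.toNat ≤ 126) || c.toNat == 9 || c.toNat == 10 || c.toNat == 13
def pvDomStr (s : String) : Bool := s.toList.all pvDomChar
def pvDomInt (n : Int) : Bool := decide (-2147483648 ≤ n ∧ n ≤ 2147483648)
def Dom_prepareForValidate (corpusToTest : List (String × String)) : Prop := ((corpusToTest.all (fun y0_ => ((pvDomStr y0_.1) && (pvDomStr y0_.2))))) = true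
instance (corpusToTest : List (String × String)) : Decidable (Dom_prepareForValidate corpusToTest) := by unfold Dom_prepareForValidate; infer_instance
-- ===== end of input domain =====

-- B reorganises A's single accumulator loop into two passes (partition into
-- 'slut'-terminated segments, then format each with join+rstrip); objective: simpler.

-- ===== PORT A =====
-- loop body of A's single for-loop, state = (tuppleListOfSeq, sequence, correctTagSeq)
def pvStepA (st : List (String × String) × String × String) (p : String × String) :
    List (String × String) × String × String :=
  let tagseq := st.2.2 ++ p.1 ++ " "
  let seq := if p.2 != "''" then st.2.1 ++ p.2 ++ " " else st.2.1
  if p.1 == "slut" then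
    (st.1 ++ [(PySem.Str.rstrip seq, PySem.Str.rstrip tagseq)], "", "")
  else
    (st.1, seq, tagseq)

def prepareForValidate (corpusToTest : List (String × String)) : List (String × String) :=
  (corpusToTest.foldl pvStepA ([], "", "")).1

-- ===== PORT B =====
-- pass 1 loop body: state = (segments, current)
def pvStepB (st : List (List (String × String)) × List (String × String)) (p : String × String) :
    List (List (String × String)) × List (String × String) :=
  let cur := st.2 ++ [p]
  if p.1 == "slut" then (st.1 ++ [cur], []) else (st.1, cur)

-- pass 2: format one segment
def pvFormat (seg : List (String × String)) : String × String :=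
  (PySem.Str.rstrip (PySem.Str.join " " ((seg.filter (fun p => p.2 != "''")).map Prod.snd)),
   PySem.Str.rstrip (PySem.Str.join " " (seg.map Prod.fst)))

def prepareForValidate_alt (corpusToTest : List (String × String)) : List (String × String) :=
  ((corpusToTest.foldl pvStepB ([], [])).1).map pvFormat

-- ===== PRECONDITION & SPEC =====
def Spec_prepareForValidate (corpusToTest : List (String × String)) (out : List (String × String)) : Prop := out = prepareForValidate_alt corpusToTest
instance (corpusToTest : List (String × String)) (out : List (String × String)) : Decidable (Spec_prepareForValidate corpusToTest out) := by unfold Spec_prepareForValidate; infer_instance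

-- ===== CLAIM (what is proved, stated in full; the proofs are below) =====
def Claim_equal_prepareForValidate : Prop := ∀ (corpusToTest : List (String × String)), Dom_prepareForValidate corpusToTest → Spec_prepareForValidate corpusToTest (prepareForValidate corpusToTest)

-- ===== LEMMAS AND PROOFS =====

-- A's `sequence` as a char list, in terms of the current segment
def pvSeqInv (cur : List (String × String)) : List Char :=
  ((cur.filter (fun p => p.2 != "''")).map (fun p => p.2.toList ++ [' '])).flatten

-- A's `correctTagSeq` as a char list, in terms of the current segment
def pvTagInv (cur : List (String × String)) : List Char :=
  (cur.map (fun p => p.1.toList ++ [' '])).flatten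

theorem pv_rstrip_append_space (l : List Char) :
    PySem.Chars.rstrip (l ++ [' ']) = PySem.Chars.rstrip l := by
  simp [PySem.Chars.rstrip, show PySem.Chars.isspace ' ' = true from rfl]

theorem pv_flat_eq_join (xs : List (List Char)) (h : xs ≠ []) :
    (xs.map (· ++ [' '])).flatten = PySem.Chars.join [' '] xs ++ [' '] := by
  induction xs with
  | nil => exact absurd rfl h
  | cons x rest ih =>
    cases rest with
    | nil => simp [PySem.Chars.join_singleton]
    | cons y r =>
      rw [PySem.Chars.join_cons_cons]
      simp only [List.map_cons, List.flatten_cons] at *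
      rw [ih (by simp)]
      simp [List.append_assoc]

theorem pv_rstrip_flat (xs : List (List Char)) :
    PySem.Chars.rstrip ((xs.map (· ++ [' '])).flatten)
      = PySem.Chars.rstrip (PySem.Chars.join [' '] xs) := by
  cases xs with
  | nil => simp [PySem.Chars.join_nil]
  | cons x r =>
    rw [pv_flat_eq_join _ (by simp), pv_rstrip_append_space]

-- the formatted pair equals A's (rstrip sequence, rstrip correctTagSeq)
theorem pv_format_eq (cur : List (String × String)) (seq tagseq : String)
    (hs : seq.toList = pvSeqInv cur) (ht : tagseq.toList = pvTagInv cur) :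
    (PySem.Str.rstrip seq, PySem.Str.rstrip tagseq) = pvFormat cur := by
  unfold pvFormat
  refine Prod.ext ?_ ?_ <;> apply String.toList_inj.mp
  · simp only [PySem.Str.toList_rstrip, PySem.Str.toList_join, hs, pvSeqInv, List.map_map,
      show (" " : String).toList = [' '] from rfl]
    rw [← pv_rstrip_flat, List.map_map]
    exact congrArg PySem.Chars.rstrip
      (congrArg List.flatten (List.map_congr_left (fun x _ => rfl)))
  · simp only [PySem.Str.toList_rstrip, PySem.Str.toList_join, ht, pvTagInv, List.map_map,
      show (" " : String).toList = [' '] from rfl]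
    rw [← pv_rstrip_flat, List.map_map]
    exact congrArg PySem.Chars.rstrip
      (congrArg List.flatten (List.map_congr_left (fun x _ => rfl)))

theorem pvB_prefix : ∀ (l : List (String × String)) (segs : List (List (String × String)))
    (cur : List (String × String)),
    (l.foldl pvStepB (segs, cur)).1 = segs ++ (l.foldl pvStepB ([], cur)).1 := by
  intro l
  induction l with
  | nil => intro segs cur; simp
  | cons p l ih =>
    intro segs cur
    simp only [List.foldl_cons, pvStepB]
    by_cases h : p.1 == "slut"
    · simp only [h, if_true]
      simp only [List.nil_append]
      rw [ih (segs ++ [cur ++ [p]]), ih [cur ++ [p]]]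
      simp
    · simp only [h]
      exact ih segs (cur ++ [p])

theorem pvMain : ∀ (l : List (String × String)) (res : List (String × String))
    (seq tagseq : String) (cur : List (String × String)),
    seq.toList = pvSeqInv cur → tagseq.toList = pvTagInv cur →
    (l.foldl pvStepA (res, seq, tagseq)).1
      = res ++ ((l.foldl pvStepB (([] : List (List (String × String))), cur)).1).map pvFormat := by
  intro l
  induction l with
  | nil => intro res seq tagseq cur _ _; simp
  | cons p l ih =>
    intro res seq tagseq cur hs ht
    have hs' : (if p.2 != "''" then seq ++ p.2 ++ " " else seq).toList = pvSeqInv (cur ++ [p]) := by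
      by_cases hp : p.2 != "''" <;>
        simp [pvSeqInv, List.filter_append, hp, hs, List.filter,
          show (" " : String).toList = [' '] from rfl]
    have ht' : (tagseq ++ p.1 ++ " ").toList = pvTagInv (cur ++ [p]) := by
      simp [pvTagInv, ht, show (" " : String).toList = [' '] from rfl]
    simp only [List.foldl_cons, pvStepA, pvStepB]
    by_cases h : p.1 == "slut"
    · simp only [h, if_true, List.nil_append]
      rw [ih _ "" "" [] rfl rfl, pvB_prefix l [cur ++ [p]] [],
          pv_format_eq (cur ++ [p]) _ _ hs' ht']
      simp
    · simp only [h]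
      exact ih res _ _ (cur ++ [p]) hs' ht'

-- ===== VERDICT (by name: the statement is the Claim_ definition above) =====
theorem prepareForValidate_spec : Claim_equal_prepareForValidate := by
  intro c _
  unfold Spec_prepareForValidate prepareForValidate prepareForValidate_alt
  have h := pvMain c [] "" "" [] (by rfl) (by rfl)
  simpa using h
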